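-- pv_equiv track=rewrite | github.com/Zion-support/zion-support.github.io | fix_fragment_errors.py | fix_jsx_fragments
-- ===== SOURCE A (Python) =====
-- def fix_jsx_fragments(content):
--     """Fix JSX fragment closing tag errors"""
--     lines = content.split('\n')
--     result = []
--     i = 0
--
--     while i < len(lines):
--         line = lines[i]
--
--         # Look for JSX fragments that need closing tags
--         if line.strip() == '<>':
--             # Find the matching closing tag
--             fragment_lines = [line]
--             i += 1
--             depth = 1
--
--             while i < len(lines) and depth > 0:
--                 current_line = lines[i]
--                 fragment_lines.append(current_line)
--
--                 if current_line.strip() == '<>':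
--                     depth += 1
--                 elif current_line.strip() == '</>':
--                     depth -= 1
--
--                 i += 1
--
--             # If we didn't find a closing tag, add one
--             if depth > 0:
--                 fragment_lines.append('</>')
--
--             result.extend(fragment_lines)
--         else:
--             result.append(line)
--             i += 1
--
--     return '\n'.join(result)
-- ===== SOURCE B (Python) =====
-- def fix_jsx_fragments(content):
--     """Fix JSX fragment closing tag errors"""
--     depth = 0
--     for line in content.split('\n'):
--         s = line.strip()
--         if s == '<>':
--             depth += 1
--         elif s == '</>' and depth > 0:
--             depth -= 1
--     return content + '\n</>' if depth > 0 else content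
-- ===== Notes on version B (the rewrite author's own statement) =====
-- stated objective: simpler
-- what changed: Replaced A's nested while-loops with a fragment_lines buffer and a result list by a single flat pass over the lines keeping one clamped integer depth counter, appending ' </>' to the unchanged content when fragments remain open.
import Mathlib
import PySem

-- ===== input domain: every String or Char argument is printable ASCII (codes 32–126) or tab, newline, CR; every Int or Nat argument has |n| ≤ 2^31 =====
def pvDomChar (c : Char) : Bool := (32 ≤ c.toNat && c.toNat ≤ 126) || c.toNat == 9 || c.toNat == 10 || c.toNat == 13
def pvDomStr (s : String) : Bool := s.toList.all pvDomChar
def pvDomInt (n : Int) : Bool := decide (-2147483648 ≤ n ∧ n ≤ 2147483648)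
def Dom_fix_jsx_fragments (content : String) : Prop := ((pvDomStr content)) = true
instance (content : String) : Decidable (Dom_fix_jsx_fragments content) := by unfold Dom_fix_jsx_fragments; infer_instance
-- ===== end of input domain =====

-- B replaces A's nested while-loops and fragment buffer with one flat fold keeping a
-- clamped depth counter, appending a single '</>' at the end when fragments stay open
-- (objective: simpler).

-- ===== PORT A =====
-- inner while-loop: consumes lines while depth > 0, collecting them into acc
-- (fragment_lines); returns (fragment_lines possibly with '</>' appended, remaining lines)
def fixJsxInner (ls : List String) (depth : Int) (acc : List String) :
    List String × List String :=
  match ls with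
  | [] => if 0 < depth then (acc ++ ["</>"], []) else (acc, [])
  | l :: rest =>
    if 0 < depth then
      let d' := if PySem.Str.strip l = "<>" then depth + 1
                else if PySem.Str.strip l = "</>" then depth - 1
                else depth
      fixJsxInner rest d' (acc ++ [l])
    else (acc, ls)

theorem fixJsxInner_snd_length (ls : List String) (depth : Int) (acc : List String) :
    (fixJsxInner ls depth acc).2.length ≤ ls.length := by
  induction ls generalizing depth acc with
  | nil => simp [fixJsxInner]; split <;> simp
  | cons l rest ih =>
    simp only [fixJsxInner]
    split
    · exact le_trans (ih _ _) (by simp)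
    · simp

-- outer while-loop over the lines
def fixJsxOuter (ls : List String) : List String :=
  match ls with
  | [] => []
  | line :: rest =>
    if PySem.Str.strip line = "<>" then
      let p := fixJsxInner rest 1 [line]
      p.1 ++ fixJsxOuter p.2
    else line :: fixJsxOuter rest
termination_by ls.length
decreasing_by
  · exact Nat.lt_succ_of_le (fixJsxInner_snd_length rest 1 [line])
  · simp

def fix_jsx_fragments (content : String) : String :=
  -- content.split('\n'): sep is nonempty, so Str.split? always returns some
  let lines := (PySem.Str.split? content "\n").getD []
  PySem.Str.join "\n" (fixJsxOuter lines)

-- ===== PORT B =====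
-- the loop body of Source B: depth update per line, decrement only when depth > 0
def fragStep (d : Int) (line : String) : Int :=
  let s := PySem.Str.strip line
  if s = "<>" then d + 1
  else if s = "</>" ∧ 0 < d then d - 1
  else d

def fix_jsx_fragments_alt (content : String) : String :=
  let depth := ((PySem.Str.split? content "\n").getD []).foldl fragStep (0 : Int)
  if 0 < depth then content ++ "\n</>" else content

-- ===== PRECONDITION & SPEC =====
def Spec_fix_jsx_fragments (content : String) (out : String) : Prop := out = fix_jsx_fragments_alt content
instance (content : String) (out : String) : Decidable (Spec_fix_jsx_fragments content out) := by unfold Spec_fix_jsx_fragments; infer_instance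

-- ===== CLAIM (what is proved, stated in full; the proofs are below) =====
def Claim_equal_fix_jsx_fragments : Prop := ∀ (content : String), Dom_fix_jsx_fragments content → Spec_fix_jsx_fragments content (fix_jsx_fragments content)

-- ===== LEMMAS AND PROOFS =====

-- the inner loop either consumes everything (and may append '</>'), or stops at the
-- matching closer with the clamped fold reaching 0 on the consumed prefix
theorem fixJsxInner_spec (ls : List String) (d : Int) (acc : List String) (hd : 0 < d) :
    (fixJsxInner ls d acc
        = (acc ++ ls ++ (if 0 < ls.foldl fragStep d then ["</>"] else []), []))
    ∨ (∃ pre post, ls = pre ++ post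
        ∧ fixJsxInner ls d acc = (acc ++ pre, post)
        ∧ ls.foldl fragStep d = post.foldl fragStep 0) := by
  induction ls generalizing d acc with
  | nil =>
    left
    simp [fixJsxInner, hd]
  | cons l rest ih =>
    have hstep : fragStep d l
        = (if PySem.Str.strip l = "<>" then d + 1
           else if PySem.Str.strip l = "</>" then d - 1 else d) := by
      simp only [fragStep]
      split_ifs with h1 h2 h3 h4 <;> simp_all
    have hge : (0:Int) ≤ fragStep d l := by
      rw [hstep]; split_ifs <;> omega
    simp only [fixJsxInner, if_pos hd, ← hstep]
    by_cases hd' : 0 < fragStep d l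
    · rcases ih (fragStep d l) (acc ++ [l]) hd' with h | ⟨pre, post, hsplit, heq, hfold⟩
      · left
        simp [h, List.foldl_cons]
      · right
        exact ⟨l :: pre, post, by simp [hsplit], by simp [heq], by simp [List.foldl_cons, hfold]⟩
    · right
      have h0 : fragStep d l = 0 := le_antisymm (by omega) hge
      refine ⟨[l], rest, by simp, ?_, by simp [List.foldl_cons, h0]⟩
      cases rest with
      | nil => simp [fixJsxInner, hd']
      | cons r rs => simp [fixJsxInner, hd']

-- the outer loop copies the lines and appends one '</>' iff the clamped depth ends positive
theorem fixJsxOuter_spec (ls : List String) :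
    fixJsxOuter ls = ls ++ (if 0 < ls.foldl fragStep 0 then ["</>"] else []) := by
  induction hn : ls.length using Nat.strong_induction_on generalizing ls with
  | _ n ih =>
  cases ls with
  | nil => simp [fixJsxOuter]
  | cons line rest =>
    have hstep0 : fragStep (0 : Int) line
        = (if PySem.Str.strip line = "<>" then 1 else 0) := by
      simp only [fragStep]
      split_ifs <;> simp_all
    by_cases h : PySem.Str.strip line = "<>"
    · rcases fixJsxInner_spec rest 1 [line] (by omega) with heq | ⟨pre, post, hsplit, heq, hfold⟩
      · simp only [fixJsxOuter, if_pos h, heq]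
        simp [List.foldl_cons, hstep0, h]
      · have hlen : post.length < n := by
          subst hn; subst hsplit; simp
        simp only [fixJsxOuter, if_pos h, heq]
        rw [ih post.length hlen post rfl]
        subst hsplit
        simp [List.foldl_cons, hstep0, h, hfold]
    · have hlen : rest.length < n := by subst hn; simp
      simp only [fixJsxOuter, if_neg h]
      rw [ih rest.length hlen rest rfl]
      simp [List.foldl_cons, hstep0, h]

theorem intercalate_append_single {α : Type} (sep y : List α) (xs : List (List α))
    (hxs : xs ≠ []) :
    sep.intercalate (xs ++ [y]) = sep.intercalate xs ++ sep ++ y := by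
  induction xs with
  | nil => exact absurd rfl hxs
  | cons a l ih =>
    cases l with
    | nil => simp [List.intercalate, List.intersperse]
    | cons b l' =>
      have h1 : sep.intercalate ((a :: b :: l') ++ [y])
          = a ++ sep ++ sep.intercalate ((b :: l') ++ [y]) := by
        simp [List.intercalate, List.intersperse]
      have h2 : sep.intercalate (a :: b :: l') = a ++ sep ++ sep.intercalate (b :: l') := by
        simp [List.intercalate, List.intersperse]
      rw [h1, ih (by simp), h2]
      simp [List.append_assoc]

-- equation lemmas for PySem.Chars.splitOn.go
theorem splitOn_go_zero (sep l cur : List Char) (acc : List (List Char)) :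
    PySem.Chars.splitOn.go sep 0 l cur acc = ((cur.reverse ++ l) :: acc).reverse := by
  rw [PySem.Chars.splitOn.go]

theorem splitOn_go_succ_nil (sep cur : List Char) (f : Nat) (acc : List (List Char)) :
    PySem.Chars.splitOn.go sep (f+1) [] cur acc = (cur.reverse :: acc).reverse := by
  rw [PySem.Chars.splitOn.go]
  omega

theorem splitOn_go_succ_cons (sep cur : List Char) (f : Nat) (c : Char) (rest : List Char)
    (acc : List (List Char)) :
    PySem.Chars.splitOn.go sep (f+1) (c::rest) cur acc =
      if sep.isPrefixOf (c::rest) then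
        PySem.Chars.splitOn.go sep f (List.drop sep.length (c::rest)) [] (cur.reverse::acc)
      else PySem.Chars.splitOn.go sep f rest (c::cur) acc := by
  rw [PySem.Chars.splitOn.go]

-- PySem.Chars.splitOn.go never returns the empty list
theorem splitOn_go_ne_nil (sep : List Char) (fuel : Nat) (l cur : List Char)
    (acc : List (List Char)) : PySem.Chars.splitOn.go sep fuel l cur acc ≠ [] := by
  induction fuel generalizing l cur acc with
  | zero => simp [splitOn_go_zero]
  | succ f ih =>
    cases l with
    | nil => simp [splitOn_go_succ_nil]
    | cons c rest =>
      rw [splitOn_go_succ_cons]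
      split
      · exact ih _ _ _
      · exact ih _ _ _

theorem splitOn_ne_nil (s sep : List Char) : PySem.Chars.splitOn s sep ≠ [] :=
  splitOn_go_ne_nil sep (s.length + 1) s [] []

-- joining the pieces of splitOn with the separator restores the string
theorem intercalate_go (sep : List Char) (hsep : sep ≠ []) (fuel : Nat) :
    ∀ (l cur : List Char) (acc : List (List Char)), l.length < fuel →
    sep.intercalate (PySem.Chars.splitOn.go sep fuel l cur acc)
      = sep.intercalate acc.reverse ++ (if acc = [] then [] else sep) ++ cur.reverse ++ l := by
  induction fuel with
  | zero => intro l cur acc h; omega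
  | succ f ih =>
    intro l cur acc h
    cases l with
    | nil =>
      rw [splitOn_go_succ_nil]
      cases acc with
      | nil => simp [List.intercalate]
      | cons a as =>
        have : (cur.reverse :: a :: as).reverse = (a :: as).reverse ++ [cur.reverse] := by simp
        rw [this, intercalate_append_single sep cur.reverse (a :: as).reverse (by simp)]
        simp
    | cons c rest =>
      rw [splitOn_go_succ_cons]
      split
      · next hpre =>
        obtain ⟨t, ht⟩ := List.isPrefixOf_iff_prefix.mp hpre
        rw [ih (List.drop sep.length (c :: rest)) [] (cur.reverse :: acc) (by
          have hsl : 1 ≤ sep.length := by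
            cases sep with | nil => exact absurd rfl hsep | cons _ _ => simp
          simp only [List.length_drop]
          simp at h ⊢
          omega)]
        cases acc with
        | nil => simp [List.intercalate, ← ht]
        | cons a as =>
          have hrev : (cur.reverse :: a :: as).reverse = (a :: as).reverse ++ [cur.reverse] := by
            simp
          rw [hrev, intercalate_append_single sep cur.reverse (a :: as).reverse (by simp)]
          simp [← ht, List.append_assoc]
      · next hpre =>
        rw [ih rest (c :: cur) acc (by simp at h ⊢; omega)]
        simp [List.append_assoc]

theorem intercalate_splitOn (s sep : List Char) (hsep : sep ≠ []) :
    sep.intercalate (PySem.Chars.splitOn s sep) = s := by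
  unfold PySem.Chars.splitOn
  rw [intercalate_go sep hsep (s.length + 1) s [] [] (by omega)]
  simp [List.intercalate]

-- ===== VERDICT (by name: the statement is the Claim_ definition above) =====
theorem fix_jsx_fragments_spec : Claim_equal_fix_jsx_fragments := by
  intro content _
  unfold Spec_fix_jsx_fragments fix_jsx_fragments fix_jsx_fragments_alt
  have hsplit : PySem.Str.split? content "\n"
      = some ((PySem.Chars.splitOn content.toList "\n".toList).map String.ofList) := by
    simp [PySem.Str.split?, PySem.Chars.split?]
  set chunks := PySem.Chars.splitOn content.toList "\n".toList with hchunks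
  have hne : chunks ≠ [] := splitOn_ne_nil _ _
  have hround : ("\n".toList : List Char).intercalate chunks = content.toList :=
    intercalate_splitOn _ _ (by decide)
  have hmapmap : (chunks.map String.ofList).map String.toList = chunks := by
    simp [List.map_map, Function.comp_def]
  rw [hsplit]
  simp only [Option.getD_some]
  rw [fixJsxOuter_spec]
  set D := (chunks.map String.ofList).foldl fragStep (0 : Int) with hD
  by_cases hpos : 0 < D
  · rw [if_pos hpos, if_pos hpos]
    simp only [PySem.Str.join]
    have hmaps : (((chunks.map String.ofList) ++ ["</>"]).map String.toList)
        = chunks ++ ["</>".toList] := by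
      simp only [List.map_append, hmapmap]
      rfl
    rw [hmaps]
    rw [show PySem.Chars.join "\n".toList (chunks ++ ["</>".toList])
        = ("\n".toList : List Char).intercalate (chunks ++ ["</>".toList]) from rfl]
    rw [intercalate_append_single _ _ _ hne, hround]
    apply String.ext
    simp
  · rw [if_neg hpos, if_neg hpos]
    simp only [PySem.Str.join, List.append_nil]
    rw [hmapmap]
    rw [show PySem.Chars.join "\n".toList chunks
        = ("\n".toList : List Char).intercalate chunks from rfl]
    rw [hround]
    apply String.ext
    simp
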